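-- pv_equiv track=rewrite | github.com/DewPeaceTigers/AlgorithmStudy | weeks/week_52/PG_169199/yeri.py | solution
-- ===== SOURCE A (Python) =====
-- from collections import deque
--
-- def solution(board):
--     answer = 0
--     start = []
--     end = []
--     for i in range(len(board)):
--         for j in range(len(board[i])):
--             if board[i][j] == 'R':
--                 start = [i,j]
--             if board[i][j] == 'G':
--                 end = [i,j]
--     q = deque([[start,0]])
--     dx = [-1,0,1,0]
--     dy = [0,-1,0,1]
--     count = [[int(1e9)]*len(board[0]) for _ in range(len(board))]
--     count[start[0]][start[1]] = 0
--     while q: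
--         [x,y], cnt = q.popleft()
--         if [x,y] == end:
--             answer = count[end[0]][end[1]]
--             break
--
--         for d in range(4):
--             cx,cy = x,y
--             while True:
--                 cx += dx[d]
--                 cy += dy[d]
--                 if not(-1<cx < len(board) and -1<cy<len(board[0])) or board[cx][cy] == 'D':
--                     cx -= dx[d]
--                     cy -= dy[d]
--                     break
--             if cnt + 1 < count[cx][cy]:
--                 count[cx][cy] = cnt +1
--                 q.append([[cx,cy], cnt+1])
--     return answer if answer !=0 else -1
-- ===== SOURCE B (Python) =====
-- from collections import deque
--
--
-- def solution(board):
--     h = len(board)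
--     w = len(board[0])
--     start = []
--     end = []
--     for i in range(h):
--         for j in range(len(board[i])):
--             if board[i][j] == 'R':
--                 start = [i, j]
--             if board[i][j] == 'G':
--                 end = [i, j]
--
--     # Precomputed landing tables: land[d][i][j] = cell where a slide from (i,j)
--     # in direction d stops (directions in A's order: up, left, down, right).
--     up = []
--     prev = None
--     for i in range(h):
--         row = [(i, j) if i == 0 or board[i - 1][j] == 'D' else prev[j]
--                for j in range(w)]
--         up.append(row)
--         prev = row
--     down = []
--     prev = None
--     for i in range(h - 1, -1, -1):
--         row = [(i, j) if i == h - 1 or board[i + 1][j] == 'D' else prev[j]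
--                for j in range(w)]
--         down.insert(0, row)
--         prev = row
--     left = []
--     for i in range(h):
--         row = []
--         for j in range(w):
--             if j == 0 or board[i][j - 1] == 'D':
--                 row.append((i, j))
--             else:
--                 row.append(row[j - 1])
--         left.append(row)
--     right = []
--     for i in range(h):
--         row = [None] * w
--         for j in range(w - 1, -1, -1):
--             if j == w - 1 or board[i][j + 1] == 'D':
--                 row[j] = (i, j)
--             else:
--                 row[j] = row[j + 1]
--         right.append(row)
--     land = [up, left, down, right]
--
--     count = [[int(1e9)] * w for _ in range(h)]
--     count[start[0]][start[1]] = 0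
--     q = deque([[start, 0]])
--     answer = 0
--     while q:
--         [x, y], cnt = q.popleft()
--         if [x, y] == end:
--             answer = count[end[0]][end[1]]
--             break
--         for d in range(4):
--             cx, cy = land[d][x][y]
--             if cnt + 1 < count[cx][cy]:
--                 count[cx][cy] = cnt + 1
--                 q.append([[cx, cy], cnt + 1])
--     return answer if answer != 0 else -1
-- ===== Notes on version B (the rewrite author's own statement) =====
-- stated objective: alternative
-- what changed: B precomputes four landing tables (one DP scan of the grid per direction) and replaces A's inner while-loop slide in every BFS relaxation by an O(1) table lookup, keeping the same deque BFS, relaxation condition and answer/-1 logic.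
-- outside the precondition, e.g. on solution(['RG', 'D']): A returns 1, B raises IndexError; on solution(['ab', 'xyR', 'R.']): A returns -1, B returns -1; on solution([]): A raises IndexError, B raises IndexError
import Mathlib
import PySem

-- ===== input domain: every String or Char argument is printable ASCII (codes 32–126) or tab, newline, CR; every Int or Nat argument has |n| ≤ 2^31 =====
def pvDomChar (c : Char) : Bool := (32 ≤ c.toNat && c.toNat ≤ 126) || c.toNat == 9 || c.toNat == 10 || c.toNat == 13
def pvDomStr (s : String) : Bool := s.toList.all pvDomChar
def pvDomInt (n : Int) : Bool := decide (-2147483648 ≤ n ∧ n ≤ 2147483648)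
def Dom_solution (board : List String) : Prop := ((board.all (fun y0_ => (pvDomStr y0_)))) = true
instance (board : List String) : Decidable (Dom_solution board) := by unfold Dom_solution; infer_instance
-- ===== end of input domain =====

-- B replaces A's inner sliding while-loop by four precomputed landing tables
-- (objective: alternative decomposition; the BFS skeleton is kept identical).

-- ===== PORT A =====

-- board[i][j] (used only under in-range guards, where it is exact)
def pvAt (g : List (List Char)) (i j : Int) : Char :=
  match PySem.List.pyGet? g i with
  | some row => (PySem.List.pyGet? row j).getD ' '
  | none => ' '

-- the double scan for the last 'R' and last 'G' (shared: both Pythons contain it verbatim)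
def pvScanCell (g : List (List Char)) (i : Nat)
    (acc2 : Option (Int × Int) × Option (Int × Int)) (j : Nat) :
    Option (Int × Int) × Option (Int × Int) :=
  let c := pvAt g (i : Int) (j : Int)
  let acc3 := if c = 'R' then (some ((i : Int), (j : Int)), acc2.2) else acc2
  if c = 'G' then (acc3.1, some ((i : Int), (j : Int))) else acc3

def pvScanRow (g : List (List Char)) (acc : Option (Int × Int) × Option (Int × Int))
    (i : Nat) : Option (Int × Int) × Option (Int × Int) :=
  (List.range (g.getD i []).length).foldl (pvScanCell g i) acc

def pvScan (g : List (List Char)) : Option (Int × Int) × Option (Int × Int) :=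
  (List.range g.length).foldl (pvScanRow g) (none, none)

-- count[x][y] reads/writes (indices are nonnegative whenever the Pythons index)
def pvGetC (c : List (List Int)) (x y : Int) : Int := (c.getD x.toNat []).getD y.toNat 0
def pvSetC (c : List (List Int)) (x y : Int) (v : Int) : List (List Int) :=
  c.set x.toNat ((c.getD x.toNat []).set y.toNat v)

def pvDx (d : Nat) : Int := ([-1, 0, 1, 0] : List Int).getD d 0
def pvDy (d : Nat) : Int := ([0, -1, 0, 1] : List Int).getD d 0

-- A's inner `while True` slide (fuel h+w+2 bounds the number of steps)
def pvSlide (g : List (List Char)) (h w : Int) (d : Nat) : Nat → Int → Int → Int × Int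
  | 0, x, y => (x, y)
  | f + 1, x, y =>
    let cx := x + pvDx d
    let cy := y + pvDy d
    if ¬(-1 < cx ∧ cx < h ∧ -1 < cy ∧ cy < w) ∨ pvAt g cx cy = 'D' then (x, y)
    else pvSlide g h w d f cx cy

-- the body of A's `for d in range(4)` loop
def pvStepA (g : List (List Char)) (h w : Int) (sf : Nat) (x y cnt : Int)
    (acc : List ((Int × Int) × Int) × List (List Int)) (d : Nat) :
    List ((Int × Int) × Int) × List (List Int) :=
  let p := pvSlide g h w d sf x y
  if cnt + 1 < pvGetC acc.2 p.1 p.2 then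
    (acc.1 ++ [(p, cnt + 1)], pvSetC acc.2 p.1 p.2 (cnt + 1))
  else acc

-- A's `while q` loop (fuel bounds iterations; each pop consumes one queue entry)
def pvBfsA (g : List (List Char)) (h w : Int) (sf : Nat) (en : Option (Int × Int)) :
    Nat → List ((Int × Int) × Int) → List (List Int) → Int
  | 0, _, _ => 0
  | f + 1, q, count =>
    match q with
    | [] => 0
    | ((x, y), cnt) :: rest =>
      if some (x, y) = en then pvGetC count x y
      else
        let s := List.foldl (pvStepA g h w sf x y cnt) (rest, count) [0, 1, 2, 3]
        pvBfsA g h w sf en f s.1 s.2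

def solution (board : List String) : Int :=
  let g := board.map (fun s => s.toList)
  let hN := g.length
  let wN := (g.getD 0 []).length
  let se := pvScan g
  match se.1 with
  | none => 0   -- A raises IndexError here (no 'R'); outside Pre_
  | some s =>
    let count0 := List.replicate hN (List.replicate wN (1000000000 : Int))
    let count1 := pvSetC count0 s.1 s.2 0
    let a := pvBfsA g (hN : Int) (wN : Int) (hN + wN + 2) se.2
      (hN * wN * 1000000000 + 2) [(s, 0)] count1
    if a ≠ 0 then a else -1

-- ===== PORT B =====

-- row i of the `up` table, from the previous (upper) row
def pvRowUp (g : List (List Char)) (w i : Nat) (prev : List (Int × Int)) : List (Int × Int) :=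
  (List.range w).map (fun (j : Nat) =>
    if i = 0 ∨ pvAt g ((i : Int) - 1) (j : Int) = 'D' then ((i : Int), (j : Int))
    else prev.getD j (0, 0))

-- rows i, i+1, …, i+n-1 of the `up` table
def pvUpRows (g : List (List Char)) (w : Nat) : Nat → Nat → List (Int × Int) → List (List (Int × Int))
  | 0, _, _ => []
  | n + 1, i, prev =>
    let row := pvRowUp g w i prev
    row :: pvUpRows g w n (i + 1) row

-- the `down` table row for grid row i = h-1-n, from the row below it
def pvRowDn (g : List (List Char)) (w h n : Nat) (prev : List (Int × Int)) : List (Int × Int) :=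
  (List.range w).map (fun (j : Nat) =>
    if n = 0 ∨ pvAt g ((h : Int) - n) (j : Int) = 'D' then ((h : Int) - 1 - n, (j : Int))
    else prev.getD j (0, 0))

-- the bottom n rows of the `down` table, built bottom-up (Source B's insert(0, row))
def pvDnRows (g : List (List Char)) (w h : Nat) : Nat → List (List (Int × Int))
  | 0 => []
  | n + 1 =>
    let t := pvDnRows g w h n
    pvRowDn g w h n (t.getD 0 []) :: t

-- cells j, j+1, …, j+n-1 of row i of the `left` table (prev = cell j-1)
def pvLCells (g : List (List Char)) (i : Nat) : Nat → Nat → (Int × Int) → List (Int × Int)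
  | 0, _, _ => []
  | n + 1, j, prev =>
    let c := if j = 0 ∨ pvAt g (i : Int) ((j : Int) - 1) = 'D' then ((i : Int), (j : Int)) else prev
    c :: pvLCells g i n (j + 1) c

-- the rightmost n cells of row i of the `right` table, built right-to-left (cell j = w-1-n)
def pvRCells (g : List (List Char)) (w i : Nat) : Nat → List (Int × Int)
  | 0 => []
  | n + 1 =>
    let t := pvRCells g w i n
    (if n = 0 ∨ pvAt g (i : Int) ((w : Int) - n) = 'D' then ((i : Int), (w : Int) - 1 - n)
     else t.getD 0 (0, 0)) :: t

-- land[d][x][y]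
def pvLand (t : List (List (Int × Int))) (x y : Int) : Int × Int :=
  (t.getD x.toNat []).getD y.toNat (0, 0)

-- the body of B's `for d in range(4)` loop: table lookup instead of a slide
def pvStepB (up lf dn rt : List (List (Int × Int))) (x y cnt : Int)
    (acc : List ((Int × Int) × Int) × List (List Int)) (d : Nat) :
    List ((Int × Int) × Int) × List (List Int) :=
  let p := pvLand (([up, lf, dn, rt]).getD d []) x y
  if cnt + 1 < pvGetC acc.2 p.1 p.2 then
    (acc.1 ++ [(p, cnt + 1)], pvSetC acc.2 p.1 p.2 (cnt + 1))
  else acc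

def pvBfsB (up lf dn rt : List (List (Int × Int))) (en : Option (Int × Int)) :
    Nat → List ((Int × Int) × Int) → List (List Int) → Int
  | 0, _, _ => 0
  | f + 1, q, count =>
    match q with
    | [] => 0
    | ((x, y), cnt) :: rest =>
      if some (x, y) = en then pvGetC count x y
      else
        let s := List.foldl (pvStepB up lf dn rt x y cnt) (rest, count) [0, 1, 2, 3]
        pvBfsB up lf dn rt en f s.1 s.2

def solution_alt (board : List String) : Int :=
  let g := board.map (fun s => s.toList)
  let hN := g.length
  let wN := (g.getD 0 []).length
  let se := pvScan g
  match se.1 with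
  | none => 0   -- B raises IndexError here (no 'R'); outside Pre_
  | some s =>
    let up := pvUpRows g wN hN 0 []
    let dn := pvDnRows g wN hN hN
    let lf := (List.range hN).map (fun i => pvLCells g i wN 0 (0, 0))
    let rt := (List.range hN).map (fun i => pvRCells g wN i wN)
    let count0 := List.replicate hN (List.replicate wN (1000000000 : Int))
    let count1 := pvSetC count0 s.1 s.2 0
    let a := pvBfsB up lf dn rt se.2 (hN * wN * 1000000000 + 2) [(s, 0)] count1
    if a ≠ 0 then a else -1

-- ===== PRECONDITION & SPEC =====
-- Pre_ excludes boards with no 'R' or with an 'R' at a column ≥ len(board[0]) (A raises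
-- IndexError), empty boards (IndexError at board[0]), and boards with a row shorter than
-- board[0], on which A can raise IndexError while sliding and B raises while tabulating.
def Pre_solution (board : List String) : Prop :=
  (∀ s ∈ board, (board.getD 0 "").toList.length ≤ s.toList.length) ∧
  (∃ s ∈ board, 'R' ∈ s.toList) ∧
  (∀ s ∈ board, 'R' ∉ s.toList.drop (board.getD 0 "").toList.length)
instance (board : List String) : Decidable (Pre_solution board) := by
  unfold Pre_solution; infer_instance

def pvWitness_solution : List String := ["R.G", "D.."]

def Spec_solution (board : List String) (out : Int) : Prop := out = solution_alt board
instance (board : List String) (out : Int) : Decidable (Spec_solution board out) := by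
  unfold Spec_solution; infer_instance

-- ===== CLAIM (what is proved, stated in full; the proofs are below) =====
def Claim_equal_solution : Prop :=
  ∀ (board : List String), Dom_solution board → Pre_solution board →
    Spec_solution board (solution board)

-- ===== LEMMAS AND PROOFS =====

-- ideal landing values, the meeting point of the two ports
def FUp (g : List (List Char)) : Nat → Nat → Int × Int
  | 0, j => (0, (j : Int))
  | i + 1, j => if pvAt g (i : Int) (j : Int) = 'D' then ((i : Int) + 1, (j : Int)) else FUp g i j

def FLt (g : List (List Char)) (i : Nat) : Nat → Int × Int
  | 0 => ((i : Int), 0)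
  | j + 1 => if pvAt g (i : Int) (j : Int) = 'D' then ((i : Int), (j : Int) + 1) else FLt g i j

def FDn (g : List (List Char)) (h : Nat) : Nat → Nat → Int × Int
  | 0, j => ((h : Int) - 1, (j : Int))
  | k + 1, j => if pvAt g ((h : Int) - 1 - k) (j : Int) = 'D' then ((h : Int) - 2 - k, (j : Int))
                else FDn g h k j

def FRt (g : List (List Char)) (w i : Nat) : Nat → Int × Int
  | 0 => ((i : Int), (w : Int) - 1)
  | k + 1 => if pvAt g (i : Int) ((w : Int) - 1 - k) = 'D' then ((i : Int), (w : Int) - 2 - k)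
             else FRt g w i k

def pvInR (h w : Nat) (p : Int × Int) : Prop :=
  0 ≤ p.1 ∧ p.1 < (h : Int) ∧ 0 ≤ p.2 ∧ p.2 < (w : Int)

-- slide characterisations
theorem slide_up (g : List (List Char)) (h w : Nat) :
    ∀ (x : Nat) (f : Nat) (y : Nat), x < h → y < w → x + 1 ≤ f →
      pvSlide g (h : Int) (w : Int) 0 f (x : Int) (y : Int) = FUp g x y := by
  intro x f y
  induction x generalizing f with
  | zero =>
    intro hx hy hf
    cases f with
    | zero => omega
    | succ f' =>
      simp only [pvSlide, pvDx, pvDy, List.getD_cons_zero]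
      rw [if_pos (Or.inl (by intro hcon; have := hcon.1; norm_num at this))]
      rfl
  | succ s ih =>
    intro hx hy hf
    cases f with
    | zero => omega
    | succ f' =>
      simp only [pvSlide, pvDx, pvDy, List.getD_cons_zero]
      have e1 : ((s + 1 : Nat) : Int) + -1 = (s : Int) := by push_cast; ring
      have e2 : ((y : Nat) : Int) + 0 = (y : Int) := by ring
      rw [e1, e2]
      by_cases hD : pvAt g (s : Int) (y : Int) = 'D'
      · rw [if_pos (Or.inr hD)]
        rw [FUp, if_pos hD]
        push_cast
        rfl
      · rw [if_neg (not_or.mpr ⟨not_not_intro ⟨by omega, by omega, by omega, by omega⟩, hD⟩)]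
        rw [FUp, if_neg hD]
        exact ih f' (by omega) hy (by omega)

theorem slide_lt (g : List (List Char)) (h w : Nat) :
    ∀ (y : Nat) (f : Nat) (x : Nat), x < h → y < w → y + 1 ≤ f →
      pvSlide g (h : Int) (w : Int) 1 f (x : Int) (y : Int) = FLt g x y := by
  have hdx : pvDx 1 = 0 := rfl
  have hdy : pvDy 1 = -1 := rfl
  intro y f x
  induction y generalizing f with
  | zero =>
    intro hx hy hf
    cases f with
    | zero => omega
    | succ f' =>
      simp only [pvSlide, hdx, hdy]
      rw [if_pos (Or.inl (by intro hcon; have := hcon.2.2.1; norm_num at this))]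
      rfl
  | succ s ih =>
    intro hx hy hf
    cases f with
    | zero => omega
    | succ f' =>
      simp only [pvSlide, hdx, hdy]
      have e1 : ((x : Nat) : Int) + 0 = (x : Int) := by ring
      have e2 : ((s + 1 : Nat) : Int) + -1 = (s : Int) := by push_cast; ring
      rw [e1, e2]
      by_cases hD : pvAt g (x : Int) (s : Int) = 'D'
      · rw [if_pos (Or.inr hD)]
        rw [FLt, if_pos hD]
        push_cast
        rfl
      · rw [if_neg (not_or.mpr ⟨not_not_intro ⟨by omega, by omega, by omega, by omega⟩, hD⟩)]
        rw [FLt, if_neg hD]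
        exact ih f' hx (by omega) (by omega)

theorem slide_dn (g : List (List Char)) (h w : Nat) :
    ∀ (k : Nat) (f : Nat) (x y : Nat), x < h → y < w → (x : Int) = (h : Int) - 1 - k →
      k + 1 ≤ f → pvSlide g (h : Int) (w : Int) 2 f (x : Int) (y : Int) = FDn g h k y := by
  have hdx : pvDx 2 = 1 := rfl
  have hdy : pvDy 2 = 0 := rfl
  intro k f x y
  induction k generalizing f x with
  | zero =>
    intro hx hy hxk hf
    cases f with
    | zero => omega
    | succ f' =>
      simp only [pvSlide, hdx, hdy]
      rw [if_pos (Or.inl (by intro hcon; have := hcon.2.1; omega))]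
      rw [FDn]
      have e1 : ((x : Nat) : Int) = (h : Int) - 1 := by omega
      rw [e1]
  | succ s ih =>
    intro hx hy hxk hf
    cases f with
    | zero => omega
    | succ f' =>
      simp only [pvSlide, hdx, hdy]
      have e1 : ((x : Nat) : Int) + 1 = (h : Int) - 1 - s := by omega
      have e2 : ((y : Nat) : Int) + 0 = (y : Int) := by ring
      rw [e1, e2]
      by_cases hD : pvAt g ((h : Int) - 1 - s) (y : Int) = 'D'
      · rw [if_pos (Or.inr hD)]
        rw [FDn, if_pos hD]
        have e4 : ((x : Nat) : Int) = (h : Int) - 2 - s := by omega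
        rw [e4]
      · rw [if_neg (not_or.mpr ⟨not_not_intro ⟨by omega, by omega, by omega, by omega⟩, hD⟩)]
        rw [FDn, if_neg hD]
        have e3 : (h : Int) - 1 - s = ((x + 1 : Nat) : Int) := by omega
        rw [e3]
        exact ih f' (x + 1) (by omega) hy (by omega) (by omega)

theorem slide_rt (g : List (List Char)) (h w : Nat) :
    ∀ (k : Nat) (f : Nat) (x y : Nat), x < h → y < w → (y : Int) = (w : Int) - 1 - k →
      k + 1 ≤ f → pvSlide g (h : Int) (w : Int) 3 f (x : Int) (y : Int) = FRt g w x k := by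
  have hdx : pvDx 3 = 0 := rfl
  have hdy : pvDy 3 = 1 := rfl
  intro k f x y
  induction k generalizing f y with
  | zero =>
    intro hx hy hyk hf
    cases f with
    | zero => omega
    | succ f' =>
      simp only [pvSlide, hdx, hdy]
      rw [if_pos (Or.inl (by intro hcon; have := hcon.2.2.2; omega))]
      rw [FRt]
      have e1 : ((y : Nat) : Int) = (w : Int) - 1 := by omega
      rw [e1]
  | succ s ih =>
    intro hx hy hyk hf
    cases f with
    | zero => omega
    | succ f' =>
      simp only [pvSlide, hdx, hdy]
      have e1 : ((y : Nat) : Int) + 1 = (w : Int) - 1 - s := by omega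
      have e2 : ((x : Nat) : Int) + 0 = (x : Int) := by ring
      rw [e1, e2]
      by_cases hD : pvAt g (x : Int) ((w : Int) - 1 - s) = 'D'
      · rw [if_pos (Or.inr hD)]
        rw [FRt, if_pos hD]
        have e4 : ((y : Nat) : Int) = (w : Int) - 2 - s := by omega
        rw [e4]
      · rw [if_neg (not_or.mpr ⟨not_not_intro ⟨by omega, by omega, by omega, by omega⟩, hD⟩)]
        rw [FRt, if_neg hD]
        have e3 : (w : Int) - 1 - s = ((y + 1 : Nat) : Int) := by omega
        rw [e3]
        exact ih f' (y + 1) hx (by omega) (by omega) (by omega)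

-- table characterisations
theorem rowUp_getD (g : List (List Char)) (w : Nat) (i : Nat) (prev : List (Int × Int))
    (hp : i = 0 ∨ ∀ j' : Nat, j' < w → prev.getD j' (0, 0) = FUp g (i - 1) j') :
    ∀ j : Nat, j < w → (pvRowUp g w i prev).getD j (0, 0) = FUp g i j := by
  intro j hj
  unfold pvRowUp
  rw [PySem.List.getD_map_range _ _ _ _ hj]
  cases i with
  | zero =>
    rw [if_pos (Or.inl rfl)]
    norm_num [FUp]
  | succ s =>
    have e : ((s + 1 : Nat) : Int) - 1 = (s : Int) := by push_cast; ring
    rw [e]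
    simp only [Nat.succ_ne_zero, false_or]
    by_cases hD : pvAt g (s : Int) (j : Int) = 'D'
    · rw [if_pos hD, FUp, if_pos hD]
      push_cast
      rfl
    · rw [if_neg hD, FUp, if_neg hD]
      exact (hp.resolve_left (Nat.succ_ne_zero s)) j hj

theorem upRows_getD (g : List (List Char)) (w : Nat) :
    ∀ (n i t : Nat) (prev : List (Int × Int)), t < n →
      (i = 0 ∨ ∀ j' : Nat, j' < w → prev.getD j' (0, 0) = FUp g (i - 1) j') →
      ∀ j : Nat, j < w →
        ((pvUpRows g w n i prev).getD t []).getD j (0, 0) = FUp g (i + t) j := by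
  intro n
  induction n with
  | zero => intro i t prev ht; omega
  | succ m ih =>
    intro i t prev ht hp j hj
    cases t with
    | zero =>
      simp only [pvUpRows, List.getD_cons_zero]
      exact rowUp_getD g w i prev hp j hj
    | succ t' =>
      simp only [pvUpRows, List.getD_cons_succ]
      have hrow : ∀ j' : Nat, j' < w →
          (pvRowUp g w i prev).getD j' (0, 0) = FUp g ((i + 1) - 1) j' :=
        fun j' hj' => rowUp_getD g w i prev hp j' hj'
      have hres := ih (i + 1) t' (pvRowUp g w i prev) (by omega) (Or.inr hrow) j hj
      rw [show i + (t' + 1) = (i + 1) + t' from by omega]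
      exact hres

theorem dnRows_getD (g : List (List Char)) (w h : Nat) :
    ∀ (n t : Nat), t < n → ∀ j : Nat, j < w →
      ((pvDnRows g w h n).getD t []).getD j (0, 0) = FDn g h (n - 1 - t) j := by
  intro n
  induction n with
  | zero => intro t ht; omega
  | succ m ih =>
    intro t ht j hj
    cases t with
    | zero =>
      simp only [pvDnRows, List.getD_cons_zero]
      unfold pvRowDn
      rw [PySem.List.getD_map_range _ _ _ _ hj]
      cases m with
      | zero =>
        rw [if_pos (Or.inl rfl)]
        norm_num [FDn]
      | succ s =>
        have e : (h : Int) - ((s + 1 : Nat) : Int) = (h : Int) - 1 - s := by push_cast; ring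
        rw [e]
        simp only [Nat.succ_ne_zero, false_or]
        by_cases hD : pvAt g ((h : Int) - 1 - s) (j : Int) = 'D'
        · rw [if_pos hD]
          show _ = FDn g h (s + 1) j
          rw [FDn, if_pos hD]
          have e4 : (h : Int) - 1 - ((s + 1 : Nat) : Int) = (h : Int) - 2 - s := by
            push_cast; ring
          rw [e4]
        · rw [if_neg hD]
          show _ = FDn g h (s + 1) j
          rw [FDn, if_neg hD]
          exact ih 0 (by omega) j hj
    | succ t' =>
      simp only [pvDnRows, List.getD_cons_succ]
      rw [show (m + 1) - 1 - (t' + 1) = m - 1 - t' from by omega]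
      exact ih t' (by omega) j hj

theorem lCells_getD (g : List (List Char)) (i : Nat) :
    ∀ (n j0 t : Nat) (prev : Int × Int), t < n →
      (j0 = 0 ∨ prev = FLt g i (j0 - 1)) →
      (pvLCells g i n j0 prev).getD t (0, 0) = FLt g i (j0 + t) := by
  have hval : ∀ (j0 : Nat) (prev : Int × Int), (j0 = 0 ∨ prev = FLt g i (j0 - 1)) →
      (if j0 = 0 ∨ pvAt g (i : Int) ((j0 : Int) - 1) = 'D' then ((i : Int), (j0 : Int))
       else prev) = FLt g i j0 := by
    intro j0 prev hp
    cases j0 with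
    | zero =>
      rw [if_pos (Or.inl rfl)]
      norm_num [FLt]
    | succ s =>
      have e : ((s + 1 : Nat) : Int) - 1 = (s : Int) := by push_cast; ring
      rw [e]
      simp only [Nat.succ_ne_zero, false_or]
      by_cases hD : pvAt g (i : Int) (s : Int) = 'D'
      · rw [if_pos hD, FLt, if_pos hD]
        push_cast
        rfl
      · rw [if_neg hD, FLt, if_neg hD]
        exact hp.resolve_left (Nat.succ_ne_zero s)
  intro n
  induction n with
  | zero => intro j0 t prev ht; omega
  | succ m ih =>
    intro j0 t prev ht hp
    cases t with
    | zero =>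
      simp only [pvLCells, List.getD_cons_zero]
      exact hval j0 prev hp
    | succ t' =>
      simp only [pvLCells, List.getD_cons_succ]
      have hres := ih (j0 + 1) t' _ (by omega) (Or.inr (hval j0 prev hp))
      rw [show j0 + (t' + 1) = (j0 + 1) + t' from by omega]
      exact hres

theorem rCells_getD (g : List (List Char)) (w i : Nat) :
    ∀ (n t : Nat), t < n → (pvRCells g w i n).getD t (0, 0) = FRt g w i (n - 1 - t) := by
  intro n
  induction n with
  | zero => intro t ht; omega
  | succ m ih =>
    intro t ht
    cases t with
    | zero =>
      simp only [pvRCells, List.getD_cons_zero]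
      cases m with
      | zero =>
        rw [if_pos (Or.inl rfl)]
        norm_num [FRt]
      | succ s =>
        have e : (w : Int) - ((s + 1 : Nat) : Int) = (w : Int) - 1 - s := by push_cast; ring
        rw [e]
        simp only [Nat.succ_ne_zero, false_or]
        by_cases hD : pvAt g (i : Int) ((w : Int) - 1 - s) = 'D'
        · rw [if_pos hD]
          show _ = FRt g w i (s + 1)
          rw [FRt, if_pos hD]
          have e4 : (w : Int) - 1 - ((s + 1 : Nat) : Int) = (w : Int) - 2 - s := by
            push_cast; ring
          rw [e4]
        · rw [if_neg hD]
          show _ = FRt g w i (s + 1)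
          rw [FRt, if_neg hD]
          exact ih 0 (by omega)
    | succ t' =>
      simp only [pvRCells, List.getD_cons_succ]
      rw [show (m + 1) - 1 - (t' + 1) = m - 1 - t' from by omega]
      exact ih t' (by omega)

-- range of the landing values
theorem FUp_range (g : List (List Char)) (h w : Nat) :
    ∀ (x y : Nat), x < h → y < w → pvInR h w (FUp g x y) := by
  intro x y
  induction x with
  | zero => intro hx hy; simp only [FUp, pvInR]; omega
  | succ s ih =>
    intro hx hy
    simp only [FUp]
    by_cases hD : pvAt g (s : Int) (y : Int) = 'D'
    · rw [if_pos hD]; simp only [pvInR]; omega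
    · rw [if_neg hD]; exact ih (by omega) hy

theorem FLt_range (g : List (List Char)) (h w : Nat) :
    ∀ (x y : Nat), x < h → y < w → pvInR h w (FLt g x y) := by
  intro x y
  induction y with
  | zero => intro hx hy; simp only [FLt, pvInR]; omega
  | succ s ih =>
    intro hx hy
    simp only [FLt]
    by_cases hD : pvAt g (x : Int) (s : Int) = 'D'
    · rw [if_pos hD]; simp only [pvInR]; omega
    · rw [if_neg hD]; exact ih hx (by omega)

theorem FDn_range (g : List (List Char)) (h w : Nat) :
    ∀ (k y : Nat), k < h → y < w → pvInR h w (FDn g h k y) := by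
  intro k y
  induction k with
  | zero => intro hk hy; simp only [FDn, pvInR]; omega
  | succ s ih =>
    intro hk hy
    simp only [FDn]
    by_cases hD : pvAt g ((h : Int) - 1 - s) (y : Int) = 'D'
    · rw [if_pos hD]; simp only [pvInR]; omega
    · rw [if_neg hD]; exact ih (by omega) hy

theorem FRt_range (g : List (List Char)) (h w : Nat) :
    ∀ (k x : Nat), x < h → k < w → pvInR h w (FRt g w x k) := by
  intro k x
  induction k with
  | zero => intro hx hk; simp only [FRt, pvInR]; omega
  | succ s ih =>
    intro hx hk
    simp only [FRt]
    by_cases hD : pvAt g (x : Int) ((w : Int) - 1 - s) = 'D'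
    · rw [if_pos hD]; simp only [pvInR]; omega
    · rw [if_neg hD]; exact ih hx (by omega)

-- the two step functions agree (and land in range) on d < 4 and in-range (x, y)
theorem step_eq (g : List (List Char)) (h w : Nat) (x y : Nat) (hx : x < h) (hy : y < w)
    (cnt : Int) (acc : List ((Int × Int) × Int) × List (List Int)) (d : Nat) (hd : d < 4) :
    pvStepA g (h : Int) (w : Int) (h + w + 2) (x : Int) (y : Int) cnt acc d =
      pvStepB (pvUpRows g w h 0 []) ((List.range h).map (fun i => pvLCells g i w 0 (0, 0)))
        (pvDnRows g w h h) ((List.range h).map (fun i => pvRCells g w i w))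
        (x : Int) (y : Int) cnt acc d := by
  have key : pvSlide g (h : Int) (w : Int) d (h + w + 2) (x : Int) (y : Int) =
      pvLand (([pvUpRows g w h 0 [], (List.range h).map (fun i => pvLCells g i w 0 (0, 0)),
        pvDnRows g w h h, (List.range h).map (fun i => pvRCells g w i w)]).getD d [])
        (x : Int) (y : Int) := by
    interval_cases d
    · rw [slide_up g h w x (h + w + 2) y hx hy (by omega)]
      show FUp g x y = pvLand (pvUpRows g w h 0 []) (x : Int) (y : Int)
      unfold pvLand
      simp only [Int.toNat_natCast]
      have hres := upRows_getD g w h 0 x [] hx (Or.inl rfl) y hy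
      simpa using hres.symm
    · rw [slide_lt g h w y (h + w + 2) x hx hy (by omega)]
      show FLt g x y =
        pvLand ((List.range h).map (fun i => pvLCells g i w 0 (0, 0))) (x : Int) (y : Int)
      unfold pvLand
      simp only [Int.toNat_natCast]
      rw [PySem.List.getD_map_range _ _ _ _ hx]
      have hres := lCells_getD g x w 0 y (0, 0) hy (Or.inl rfl)
      simpa using hres.symm
    · rw [slide_dn g h w (h - 1 - x) (h + w + 2) x y hx hy (by omega) (by omega)]
      show FDn g h (h - 1 - x) y = pvLand (pvDnRows g w h h) (x : Int) (y : Int)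
      unfold pvLand
      simp only [Int.toNat_natCast]
      exact (dnRows_getD g w h h x hx y hy).symm
    · rw [slide_rt g h w (w - 1 - y) (h + w + 2) x y hx hy (by omega) (by omega)]
      show FRt g w x (w - 1 - y) =
        pvLand ((List.range h).map (fun i => pvRCells g w i w)) (x : Int) (y : Int)
      unfold pvLand
      simp only [Int.toNat_natCast]
      rw [PySem.List.getD_map_range _ _ _ _ hx]
      exact (rCells_getD g w x w y hy).symm
  simp only [pvStepA, pvStepB, key]

theorem stepA_inv (g : List (List Char)) (h w : Nat) (x y : Nat) (hx : x < h) (hy : y < w)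
    (cnt : Int) (acc : List ((Int × Int) × Int) × List (List Int)) (d : Nat) (hd : d < 4)
    (hq : ∀ p ∈ acc.1, pvInR h w p.1) :
    ∀ p ∈ (pvStepA g (h : Int) (w : Int) (h + w + 2) (x : Int) (y : Int) cnt acc d).1,
      pvInR h w p.1 := by
  have hs : pvInR h w (pvSlide g (h : Int) (w : Int) d (h + w + 2) (x : Int) (y : Int)) := by
    interval_cases d
    · rw [slide_up g h w x (h + w + 2) y hx hy (by omega)]
      exact FUp_range g h w x y hx hy
    · rw [slide_lt g h w y (h + w + 2) x hx hy (by omega)]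
      exact FLt_range g h w x y hx hy
    · rw [slide_dn g h w (h - 1 - x) (h + w + 2) x y hx hy (by omega) (by omega)]
      exact FDn_range g h w (h - 1 - x) y (by omega) hy
    · rw [slide_rt g h w (w - 1 - y) (h + w + 2) x y hx hy (by omega) (by omega)]
      exact FRt_range g h w (w - 1 - y) x hx (by omega)
  intro p hp
  simp only [pvStepA] at hp
  split at hp
  · rcases List.mem_append.mp hp with h1 | h2
    · exact hq p h1
    · rw [List.mem_singleton] at h2
      subst h2
      exact hs
  · exact hq p hp

theorem bfs_eq (g : List (List Char)) (h w : Nat) (en : Option (Int × Int)) :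
    ∀ (f : Nat) (q : List ((Int × Int) × Int)) (count : List (List Int)),
      (∀ p ∈ q, pvInR h w p.1) →
      pvBfsA g (h : Int) (w : Int) (h + w + 2) en f q count =
        pvBfsB (pvUpRows g w h 0 []) ((List.range h).map (fun i => pvLCells g i w 0 (0, 0)))
          (pvDnRows g w h h) ((List.range h).map (fun i => pvRCells g w i w)) en f q count := by
  intro f
  induction f with
  | zero => intro q c hq; rfl
  | succ f' ih =>
    intro q c hq
    cases q with
    | nil => rfl
    | cons hd rest =>
      obtain ⟨⟨xx, yy⟩, cnt⟩ := hd
      have hhd := hq _ (List.mem_cons_self ..)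
      simp only [pvInR] at hhd
      have ha : ((xx.toNat : Nat) : Int) = xx := Int.toNat_of_nonneg hhd.1
      have hb : ((yy.toNat : Nat) : Int) = yy := Int.toNat_of_nonneg hhd.2.2.1
      set a := xx.toNat with hadef
      set b := yy.toNat with hbdef
      have hxa : a < h := by omega
      have hyb : b < w := by omega
      rw [← ha, ← hb]
      simp only [pvBfsA, pvBfsB]
      split_ifs with he
      · rfl
      · simp only [List.foldl_cons, List.foldl_nil]
        have hstep : ∀ acc (d : Nat), d < 4 →
            pvStepA g (h : Int) (w : Int) (h + w + 2) (a : Int) (b : Int) cnt acc d =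
              pvStepB (pvUpRows g w h 0 [])
                ((List.range h).map (fun i => pvLCells g i w 0 (0, 0)))
                (pvDnRows g w h h) ((List.range h).map (fun i => pvRCells g w i w))
                (a : Int) (b : Int) cnt acc d :=
          fun acc d hd => step_eq g h w a b hxa hyb cnt acc d hd
        have htail : ∀ p ∈ rest, pvInR h w p.1 :=
          fun p hp => hq p (List.mem_cons_of_mem _ hp)
        have hinv : ∀ p ∈ (pvStepA g (h : Int) (w : Int) (h + w + 2) (a : Int) (b : Int) cnt
            (pvStepA g (h : Int) (w : Int) (h + w + 2) (a : Int) (b : Int) cnt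
              (pvStepA g (h : Int) (w : Int) (h + w + 2) (a : Int) (b : Int) cnt
                (pvStepA g (h : Int) (w : Int) (h + w + 2) (a : Int) (b : Int) cnt
                  (rest, c) 0) 1) 2) 3).1, pvInR h w p.1 := by
          apply stepA_inv g h w a b hxa hyb cnt _ 3 (by norm_num)
          apply stepA_inv g h w a b hxa hyb cnt _ 2 (by norm_num)
          apply stepA_inv g h w a b hxa hyb cnt _ 1 (by norm_num)
          apply stepA_inv g h w a b hxa hyb cnt _ 0 (by norm_num)
          exact htail
        rw [hstep _ 3 (by norm_num), hstep _ 2 (by norm_num), hstep _ 1 (by norm_num),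
          hstep _ 0 (by norm_num)] at hinv ⊢
        exact ih _ _ hinv

-- the scan yields in-bounds positions, and finds an 'R' when one exists
theorem scan_pos (g : List (List Char)) :
    ∀ p : Int × Int, (pvScan g).1 = some p →
      ∃ a b : Nat, p = ((a : Int), (b : Int)) ∧ a < g.length ∧ b < (g.getD a []).length ∧
        pvAt g (a : Int) (b : Int) = 'R' := by
  unfold pvScan
  refine List.foldlRecOn _ _ (motive := fun (acc : Option (Int × Int) × Option (Int × Int)) => ∀ p : Int × Int, acc.1 = some p →
    ∃ a b : Nat, p = ((a : Int), (b : Int)) ∧ a < g.length ∧ b < (g.getD a []).length ∧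
      pvAt g (a : Int) (b : Int) = 'R') ?_ ?_
  · intro p hp
    simp at hp
  · intro acc hacc i hi
    unfold pvScanRow
    refine List.foldlRecOn _ _ (motive := fun (acc : Option (Int × Int) × Option (Int × Int)) => ∀ p : Int × Int, acc.1 = some p →
      ∃ a b : Nat, p = ((a : Int), (b : Int)) ∧ a < g.length ∧ b < (g.getD a []).length ∧
        pvAt g (a : Int) (b : Int) = 'R') ?_ ?_
    · exact hacc
    · intro acc2 hacc2 j hj p hp
      unfold pvScanCell at hp
      dsimp only at hp
      rw [List.mem_range] at hi
      rw [List.mem_range] at hj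
      split_ifs at hp with h1 h2 h3 <;> (try dsimp only at hp) <;>
        first
          | exact hacc2 p hp
          | exact ⟨i, j, (Option.some.inj hp).symm, hi, hj, by assumption⟩

theorem scan_some (g : List (List Char)) (hR : ∃ row ∈ g, 'R' ∈ row) :
    (pvScan g).1 ≠ none := by
  obtain ⟨row, hrow, hRrow⟩ := hR
  obtain ⟨i, hi, hgi⟩ := List.mem_iff_getElem.mp hrow
  obtain ⟨j, hj, hrj⟩ := List.mem_iff_getElem.mp hRrow
  have hgd : g.getD i [] = row := by rw [List.getD_eq_getElem _ _ hi, hgi]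
  have hat : pvAt g (i : Int) (j : Int) = 'R' := by
    simp only [pvAt, PySem.List.pyGet?_natCast, List.getElem?_eq_getElem hi, hgi,
      List.getElem?_eq_getElem hj, hrj]
    rfl
  have stepPres : ∀ (i' : Nat) (acc : Option (Int × Int) × Option (Int × Int)) (j' : Nat),
      acc.1.isSome → (pvScanCell g i' acc j').1.isSome := by
    intro i' acc j' hacc
    unfold pvScanCell
    dsimp only
    split_ifs <;> simp_all
  have listPres : ∀ (i' : Nat) (l : List Nat) (acc : Option (Int × Int) × Option (Int × Int)),
      acc.1.isSome → (l.foldl (pvScanCell g i') acc).1.isSome := by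
    intro i' l acc hacc
    refine List.foldlRecOn l _
      (motive := fun (acc : Option (Int × Int) × Option (Int × Int)) => acc.1.isSome = true)
      hacc ?_
    intro b hb a _
    exact stepPres i' b a hb
  have rowPres : ∀ (acc : Option (Int × Int) × Option (Int × Int)) (i' : Nat),
      acc.1.isSome → (pvScanRow g acc i').1.isSome := by
    intro acc i' hacc
    unfold pvScanRow
    exact listPres i' _ acc hacc
  have hitCell : ∀ acc : Option (Int × Int) × Option (Int × Int),
      (pvScanCell g i acc j).1.isSome := by
    intro acc
    simp [pvScanCell, hat]
  have hitRow : ∀ acc : Option (Int × Int) × Option (Int × Int),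
      (pvScanRow g acc i).1.isSome := by
    intro acc
    unfold pvScanRow
    have hlen : (g.getD i []).length = row.length := by rw [hgd]
    rw [hlen, show row.length = (j + 1) + (row.length - j - 1) from by omega, List.range_add,
      List.foldl_append, List.range_succ, List.foldl_append]
    simp only [List.foldl_cons, List.foldl_nil]
    exact listPres i _ _ (hitCell _)
  have hmain : ((List.range g.length).foldl (pvScanRow g) (none, none)).1.isSome := by
    rw [show g.length = (i + 1) + (g.length - i - 1) from by omega, List.range_add,
      List.foldl_append, List.range_succ, List.foldl_append]
    simp only [List.foldl_cons, List.foldl_nil]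
    refine List.foldlRecOn _ _
      (motive := fun (acc : Option (Int × Int) × Option (Int × Int)) => acc.1.isSome = true)
      (hitRow _) ?_
    intro b hb a _
    exact rowPres b a hb
  unfold pvScan
  exact Option.isSome_iff_ne_none.mp hmain

-- ===== VERDICT (by name: the statement is the Claim_ definition above) =====
theorem solution_spec : Claim_equal_solution := by
  unfold Claim_equal_solution
  intro board _ hPre
  unfold Spec_solution solution solution_alt
  obtain ⟨hlen, hR, hRW⟩ := hPre
  set g := board.map (fun s => s.toList) with hg
  have hRg : ∃ row ∈ g, 'R' ∈ row := by
    obtain ⟨s, hs, hRs⟩ := hR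
    exact ⟨s.toList, List.mem_map_of_mem hs, hRs⟩
  cases hsc : (pvScan g).1 with
  | none => exact absurd hsc (scan_some g hRg)
  | some p =>
    obtain ⟨a, b, hpab, hal, hbl, hRat⟩ := scan_pos g p hsc
    have halb : a < board.length := by simpa [hg] using hal
    have h0g : 0 < g.length := by omega
    have h0b : 0 < board.length := by omega
    have hgae : g.getD a [] = g[a]'hal := List.getD_eq_getElem _ _ hal
    have hbl' : b < (g[a]'hal).length := by rw [← hgae]; exact hbl
    have hRcell : (g[a]'hal)[b]'hbl' = 'R' := by
      have h1 : pvAt g (a : Int) (b : Int) = ((g[a]'hal)[b]?).getD ' ' := by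
        simp only [pvAt, PySem.List.pyGet?_natCast, List.getElem?_eq_getElem hal]
      rw [List.getElem?_eq_getElem hbl', Option.getD_some] at h1
      exact h1.symm.trans hRat
    have hbw : b < (g.getD 0 []).length := by
      by_contra hge
      rw [not_lt] at hge
      have hlt : b - (g.getD 0 []).length < ((g[a]'hal).drop (g.getD 0 []).length).length := by
        rw [List.length_drop]
        omega
      have hq : ((g[a]'hal).drop (g.getD 0 []).length)[b - (g.getD 0 []).length]? =
          (g[a]'hal)[b]? := by
        rw [List.getElem?_drop]
        congr 1
        omega
      have hmem : 'R' ∈ (g[a]'hal).drop (g.getD 0 []).length := by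
        apply List.mem_of_getElem? (i := b - (g.getD 0 []).length)
        rw [hq, List.getElem?_eq_getElem hbl', hRcell]
      have hwl : (g.getD 0 []).length = (board.getD 0 "").toList.length := by
        rw [List.getD_eq_getElem _ _ h0g, List.getD_eq_getElem _ _ h0b]
        simp [hg]
      have hgb : g[a]'hal = (board[a]'halb).toList := by simp [hg]
      rw [hwl, hgb] at hmem
      exact hRW (board[a]'halb) (List.getElem_mem halb) hmem
    simp only [hsc]
    rw [bfs_eq g g.length ((g.getD 0 []).length) (pvScan g).2 _ [(p, 0)] _ ?_]
    intro q hq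
    rw [List.mem_singleton] at hq
    subst hq
    subst hpab
    simp only [pvInR]
    refine ⟨?_, ?_, ?_, ?_⟩ <;> omega
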